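-- pv_equiv track=rewrite | github.com/jkreklow/radproc | build/lib/radproc/wradlib_io.py | get_radolan_header_token_pos
-- ===== SOURCE A (Python) =====
-- def get_radolan_header_token():
--     """Return array with known header token of radolan composites
--
--     Returns
--     -------
--     head : dict
--         with known header token, value set to None
--     *JP: 'VR': None added for new data format *
--     """
--     head = {'BY': None, 'VS': None, 'SW': None, 'PR': None,
--             'INT': None, 'GP': None, 'MS': None, 'LV': None,
--             'CS': None, 'MX': None, 'BG': None, 'ST': None,
--             'VV': None, 'MF': None, 'VR': None}
--     return head
--
-- def get_radolan_header_token_pos(header):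
--     """Get Token and positions from DWD radolan header
--
--     Parameters
--     ----------
--     header : string
--         (ASCII header)
--
--     Returns
--     -------
--     head : dictionary
--         with found header tokens and positions
--     """
--
--     head_dict = get_radolan_header_token()
--
--     for token in head_dict.keys():
--         d = header.rfind(token)
--         if d > -1:
--             head_dict[token] = d
--     head = {}
--
--     result_dict = {}
--     result_dict.update((k, v) for k, v in head_dict.items() if v is not None)
--     for k, v in head_dict.items():
--         if v is not None:
--             start = v + len(k)
--             filt = [x for x in result_dict.values() if x > v]
--             if filt:
--                 stop = min(filt)
--             else:
--                 stop = len(header)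
--             head[k] = (start, stop)
--         else:
--             head[k] = v
--
--     return head
-- ===== SOURCE B (Python) =====
-- TOKENS = ('BY', 'VS', 'SW', 'PR', 'INT', 'GP', 'MS', 'LV',
--           'CS', 'MX', 'BG', 'ST', 'VV', 'MF', 'VR')
--
--
-- def get_radolan_header_token_pos(header):
--     """Get Token and positions from DWD radolan header."""
--     found = {}
--     for token in TOKENS:
--         pos = header.rfind(token)
--         if pos >= 0:
--             found[token] = pos
--     cuts = sorted(found.values())
--     n = len(header)
--     head = {}
--     for token in TOKENS:
--         if token in found:
--             p = found[token]
--             stop = next((c for c in cuts if c > p), n)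
--             head[token] = (p + len(token), stop)
--         else:
--             head[token] = None
--     return head
-- ===== Notes on version B (the rewrite author's own statement) =====
-- stated objective: simpler
-- what changed: A computes each token's stop by filtering all found positions and taking min per token; B sorts the found positions once and takes, for each token, the first cut strictly greater than its position, building the result in one dict pass.
import Mathlib
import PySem

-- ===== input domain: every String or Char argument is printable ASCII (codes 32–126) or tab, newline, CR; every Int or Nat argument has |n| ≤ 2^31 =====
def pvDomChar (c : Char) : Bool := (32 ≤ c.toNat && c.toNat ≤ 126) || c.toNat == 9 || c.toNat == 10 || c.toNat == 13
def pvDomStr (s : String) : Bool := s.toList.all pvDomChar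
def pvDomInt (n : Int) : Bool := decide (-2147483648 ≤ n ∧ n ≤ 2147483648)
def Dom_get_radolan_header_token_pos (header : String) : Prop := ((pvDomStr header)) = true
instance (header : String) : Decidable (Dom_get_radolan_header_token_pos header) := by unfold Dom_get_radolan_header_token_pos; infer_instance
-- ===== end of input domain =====

-- B replaces A's per-token min-over-filtered-positions with one sorted cut list scanned for
-- the first cut strictly greater than the token's position (objective: simpler).

-- ===== PORT A =====
def get_radolan_header_token : PySem.Dict String (Option Int) :=
  PySem.Dict.ofList [("BY", none), ("VS", none), ("SW", none), ("PR", none),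
    ("INT", none), ("GP", none), ("MS", none), ("LV", none),
    ("CS", none), ("MX", none), ("BG", none), ("ST", none),
    ("VV", none), ("MF", none), ("VR", none)]

def get_radolan_header_token_pos (header : String) : List (String × Option (Int × Int)) :=
  let head_dict0 := get_radolan_header_token
  let head_dict := head_dict0.keys.foldl (fun hd token =>
      let d := PySem.Str.rfind header token
      if d > -1 then hd.insert token (some d) else hd) head_dict0
  let result_dict : PySem.Dict String Int :=
    PySem.Dict.update PySem.Dict.empty
      (head_dict.items.filterMap (fun kv => match kv.2 with
        | some v => some (kv.1, v)
        | none => none))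
  let head := head_dict.items.foldl
    (fun (head : PySem.Dict String (Option (Int × Int))) kv =>
      match kv.2 with
      | some v =>
        let start := v + PySem.Str.len kv.1
        let filt := result_dict.values.filter (fun x => decide (x > v))
        let stop := if filt ≠ [] then (PySem.List.min? filt (fun x => x)).getD 0
                    else PySem.Str.len header
        head.insert kv.1 (some (start, stop))
      | none => head.insert kv.1 none) PySem.Dict.empty
  head.items

-- ===== PORT B =====
def pvTOKENS : List String := ["BY", "VS", "SW", "PR", "INT", "GP", "MS", "LV",
  "CS", "MX", "BG", "ST", "VV", "MF", "VR"]

def get_radolan_header_token_pos_alt (header : String) : List (String × Option (Int × Int)) :=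
  let found : PySem.Dict String Int := pvTOKENS.foldl (fun d token =>
      let pos := PySem.Str.rfind header token
      if pos ≥ 0 then d.insert token pos else d) PySem.Dict.empty
  let cuts := PySem.List.sorted found.values (fun x => x) false
  let n := PySem.Str.len header
  let head := pvTOKENS.foldl
    (fun (head : PySem.Dict String (Option (Int × Int))) token =>
      if found.contains token then
        let p := found.getD token 0
        let stop := (cuts.find? (fun c => decide (c > p))).getD n
        head.insert token (some (p + PySem.Str.len token, stop))
      else head.insert token none) PySem.Dict.empty
  head.items

-- ===== PRECONDITION & SPEC =====
def Spec_get_radolan_header_token_pos (header : String) (out : List (String × Option (Int × Int))) : Prop := out = get_radolan_header_token_pos_alt header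
instance (header : String) (out : List (String × Option (Int × Int))) : Decidable (Spec_get_radolan_header_token_pos header out) := by unfold Spec_get_radolan_header_token_pos; infer_instance

-- ===== CLAIM (what is proved, stated in full; the proofs are below) =====
def Claim_equal_get_radolan_header_token_pos : Prop := ∀ (header : String), Dom_get_radolan_header_token_pos header → Spec_get_radolan_header_token_pos header (get_radolan_header_token_pos header)

-- ===== LEMMAS AND PROOFS =====

-- get? after a conditional-insert loop
theorem get_foldl_cond_insert {ν : Type} (ts : List String) (p : String → Prop)
    [DecidablePred p] (v : String → ν) (d : PySem.Dict String ν) (k : String) :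
    (ts.foldl (fun d t => if p t then d.insert t (v t) else d) d).get? k
      = if k ∈ ts ∧ p k then some (v k) else d.get? k := by
  induction ts generalizing d with
  | nil => simp
  | cons t tl ih =>
    simp only [List.foldl_cons, ih]
    by_cases hk : k = t
    · subst hk
      by_cases hp : p k
      · simp [hp, PySem.Dict.get?_insert_self]
      · simp [hp]
    · by_cases hp : p t
      · simp only [hp, if_true, PySem.Dict.get?_insert_of_ne d (v t) hk]
        simp [List.mem_cons, hk]
      · simp [hp, List.mem_cons, hk]

-- keys unchanged when the loop only touches existing keys
theorem keys_foldl_cond_insert {ν : Type} (ts : List String) (p : String → Prop)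
    [DecidablePred p] (v : String → ν) (d : PySem.Dict String ν)
    (h : ∀ t ∈ ts, d.contains t = true) :
    (ts.foldl (fun d t => if p t then d.insert t (v t) else d) d).keys = d.keys := by
  induction ts generalizing d with
  | nil => simp
  | cons t tl ih =>
    simp only [List.foldl_cons]
    by_cases hp : p t
    · simp only [hp, if_true]
      rw [ih]
      · exact PySem.Dict.keys_insert_of_contains d (v t) (h t (by simp))
      · intro t' ht'
        rw [PySem.Dict.contains_insert]
        simp [h t' (by simp [ht'])]
    · simp only [hp, if_false]
      exact ih d (fun t' ht' => h t' (by simp [ht']))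

-- items of a conditional-insert loop over fresh distinct keys
theorem items_foldl_cond_insert_fresh {ν : Type} (ts : List String) (p : String → Prop)
    [DecidablePred p] (v : String → ν) (d : PySem.Dict String ν)
    (hnd : ts.Nodup) (hfresh : ∀ t ∈ ts, d.contains t = false) :
    (ts.foldl (fun d t => if p t then d.insert t (v t) else d) d).items
      = d.items ++ ts.filterMap (fun t => if p t then some (t, v t) else none) := by
  induction ts generalizing d with
  | nil => simp
  | cons t tl ih =>
    simp only [List.foldl_cons, List.filterMap_cons]
    have hndtl := (List.nodup_cons.mp hnd).2
    have hnt := (List.nodup_cons.mp hnd).1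
    by_cases hp : p t
    · simp only [hp, if_true]
      rw [ih _ hndtl]
      · rw [PySem.Dict.items_insert_of_not_contains d (v t) (hfresh t (by simp))]
        simp
      · intro t' ht'
        rw [PySem.Dict.contains_insert]
        have : t' ≠ t := fun he => hnt (he ▸ ht')
        simp [this, hfresh t' (by simp [ht'])]
    · simp only [hp, if_false]
      exact ih d hndtl (fun t' ht' => hfresh t' (by simp [ht']))

theorem map_fst_filterMap_if {α β : Type} (l : List α) (c : α → Prop) [DecidablePred c]
    (f : α → β) :
    (l.filterMap (fun a => if c a then some (a, f a) else none)).map Prod.fst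
      = l.filter (fun a => decide (c a)) := by
  induction l with
  | nil => simp
  | cons a tl ih =>
    simp only [List.filterMap_cons]
    by_cases h : c a <;> simp [h, ih]

theorem map_snd_filterMap_if {α β : Type} (l : List α) (c : α → Prop) [DecidablePred c]
    (f : α → β) :
    (l.filterMap (fun a => if c a then some (a, f a) else none)).map Prod.snd
      = l.filterMap (fun a => if c a then some (f a) else none) := by
  induction l with
  | nil => simp
  | cons a tl ih =>
    simp only [List.filterMap_cons]
    by_cases h : c a <;> simp [h, ih]

-- proof-only abbreviations: the rfind value, the found-position list, A's stop, and
-- the per-token entries of A and B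
def pvR (header t : String) : Int := PySem.Str.rfind header t
def pvP (header : String) : List Int :=
  pvTOKENS.filterMap (fun t => if pvR header t > -1 then some (pvR header t) else none)
def pvStopA (header : String) (v : Int) : Int :=
  if (pvP header).filter (fun x => decide (x > v)) ≠ [] then
    (PySem.List.min? ((pvP header).filter (fun x => decide (x > v))) (fun x => x)).getD 0
  else PySem.Str.len header
def pvFA (header t : String) : Option (Int × Int) :=
  if pvR header t > -1 then some (pvR header t + PySem.Str.len t, pvStopA header (pvR header t))
  else none
def pvP' (header : String) : List Int :=
  pvTOKENS.filterMap (fun t => if PySem.Str.rfind header t ≥ 0 then some (PySem.Str.rfind header t) else none)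
def pvGB (header t : String) : Option (Int × Int) :=
  if PySem.Str.rfind header t ≥ 0 then
    some (pvR header t + PySem.Str.len t,
      ((PySem.List.sorted (pvP' header) (fun x => x) false).find?
        (fun c => decide (c > pvR header t))).getD (PySem.Str.len header))
  else none

theorem A_norm (header : String) :
    get_radolan_header_token_pos header = pvTOKENS.map (fun t => (t, pvFA header t)) := by
  have hkeys0 : get_radolan_header_token.keys = pvTOKENS := by decide
  have hnd : pvTOKENS.Nodup := by decide
  have hcont : ∀ t ∈ pvTOKENS, get_radolan_header_token.contains t = true := by decide
  have hget0 : ∀ t ∈ pvTOKENS, get_radolan_header_token.get? t = some none := by decide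
  unfold get_radolan_header_token_pos
  dsimp only
  rw [hkeys0]
  have hHDget := get_foldl_cond_insert (ν := Option Int) pvTOKENS
    (fun t => PySem.Str.rfind header t > -1) (fun t => some (PySem.Str.rfind header t))
    get_radolan_header_token
  have hHDkeys : (pvTOKENS.foldl (fun hd token =>
      if PySem.Str.rfind header token > -1 then hd.insert token (some (PySem.Str.rfind header token)) else hd)
      get_radolan_header_token).keys = pvTOKENS := by
    rw [keys_foldl_cond_insert pvTOKENS (fun t => PySem.Str.rfind header t > -1)
      (fun t => some (PySem.Str.rfind header t)) get_radolan_header_token hcont, hkeys0]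
  have hHDitems : (pvTOKENS.foldl (fun hd token =>
      if PySem.Str.rfind header token > -1 then hd.insert token (some (PySem.Str.rfind header token)) else hd)
      get_radolan_header_token).items
      = pvTOKENS.map (fun t => (t, if PySem.Str.rfind header t > -1 then some (PySem.Str.rfind header t) else none)) := by
    rw [PySem.Dict.items_eq_map_keys _ (by rw [hHDkeys]; exact hnd) none, hHDkeys]
    apply List.map_congr_left
    intro t ht
    rw [PySem.Dict.getD_eq_get?_getD, hHDget t]
    simp only [ht, true_and]
    by_cases hp : PySem.Str.rfind header t > -1
    · rw [if_pos hp, if_pos hp]; rfl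
    · rw [if_neg hp, if_neg hp, hget0 t ht]; rfl
  rw [hHDitems]
  have hpairs : List.filterMap (fun kv => match kv.2 with
        | some v => some (kv.1, v)
        | none => none)
      (List.map (fun t => (t, if PySem.Str.rfind header t > -1 then some (PySem.Str.rfind header t) else none)) pvTOKENS)
      = pvTOKENS.filterMap (fun t => if PySem.Str.rfind header t > -1 then some (t, PySem.Str.rfind header t) else none) := by
    rw [List.filterMap_map]
    apply List.filterMap_congr
    intro t ht
    dsimp only [Function.comp]
    by_cases h : PySem.Str.rfind header t > -1
    · rw [if_pos h, if_pos h]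
    · rw [if_neg h, if_neg h]
  rw [hpairs]
  have hupd : (PySem.Dict.empty.update
      (pvTOKENS.filterMap (fun t => if PySem.Str.rfind header t > -1 then some (t, PySem.Str.rfind header t) else none)))
      = (pvTOKENS.filterMap (fun t => if PySem.Str.rfind header t > -1 then some (t, PySem.Str.rfind header t) else none)).foldl
          (fun d p => d.insert p.1 p.2) PySem.Dict.empty := rfl
  have hvals : (PySem.Dict.empty.update
      (pvTOKENS.filterMap (fun t => if PySem.Str.rfind header t > -1 then some (t, PySem.Str.rfind header t) else none))).values
      = pvP header := by
    rw [hupd]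
    have hitems2 := PySem.Dict.items_foldl_insert_fresh
      (pvTOKENS.filterMap (fun t => if PySem.Str.rfind header t > -1 then some (t, PySem.Str.rfind header t) else none))
      Prod.fst Prod.snd PySem.Dict.empty
      (fun a _ => PySem.Dict.contains_empty a.1)
      (by rw [map_fst_filterMap_if]; exact hnd.filter _)
    simp only [PySem.Dict.values, hitems2]
    rw [show (PySem.Dict.empty (κ := String) (ν := Int)).items = [] from rfl, List.nil_append]
    rw [show (fun (x : String × Int) => x.2) = (Prod.snd : String × Int → Int) from rfl]
    rw [show (fun (a : String × Int) => (a.1, a.2)) = (id : String × Int → String × Int) from funext fun a => rfl, List.map_id]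
    rw [map_snd_filterMap_if]
    rfl
  rw [hvals]
  have hstep : (fun (head : PySem.Dict String (Option (Int × Int))) (kv : String × Option Int) =>
      match kv.2 with
      | some v =>
        head.insert kv.1
          (some (v + PySem.Str.len kv.1,
            if List.filter (fun x => decide (x > v)) (pvP header) ≠ [] then
              (PySem.List.min? (List.filter (fun x => decide (x > v)) (pvP header)) fun x => x).getD 0
            else PySem.Str.len header))
      | none => head.insert kv.1 none)
      = (fun (head : PySem.Dict String (Option (Int × Int))) (kv : String × Option Int) =>
          head.insert kv.1 (match kv.2 with
            | some v => some (v + PySem.Str.len kv.1, pvStopA header v)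
            | none => none)) := by
    funext head kv
    cases kv.2 <;> rfl
  rw [hstep]
  have hit := PySem.Dict.items_foldl_insert_fresh
      (List.map (fun t => (t, if PySem.Str.rfind header t > -1 then some (PySem.Str.rfind header t) else none)) pvTOKENS)
      Prod.fst
      (fun kv => match kv.2 with
        | some v => some (v + PySem.Str.len kv.1, pvStopA header v)
        | none => none)
      PySem.Dict.empty
      (fun a _ => PySem.Dict.contains_empty a.1)
      (by rw [List.map_map]; exact hnd)
  dsimp only at hit
  rw [hit]
  rw [show (PySem.Dict.empty (κ := String) (ν := Option (Int × Int))).items = [] from rfl, List.nil_append,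
    List.map_map]
  apply List.map_congr_left
  intro t ht
  dsimp only [Function.comp]
  by_cases h : PySem.Str.rfind header t > -1
  · rw [if_pos h]
    rw [show pvFA header t = some (pvR header t + PySem.Str.len t, pvStopA header (pvR header t)) from if_pos h]
    rfl
  · rw [if_neg h]
    rw [show pvFA header t = none from if_neg h]

theorem B_norm (header : String) :
    get_radolan_header_token_pos_alt header = pvTOKENS.map (fun t => (t, pvGB header t)) := by
  have hnd : pvTOKENS.Nodup := by decide
  unfold get_radolan_header_token_pos_alt
  dsimp only
  have hfget := get_foldl_cond_insert (ν := Int) pvTOKENS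
    (fun t => PySem.Str.rfind header t ≥ 0) (fun t => PySem.Str.rfind header t) PySem.Dict.empty
  have hfvals : (pvTOKENS.foldl (fun d token =>
      if PySem.Str.rfind header token ≥ 0 then d.insert token (PySem.Str.rfind header token) else d)
      PySem.Dict.empty).values = pvP' header := by
    rw [PySem.Dict.values,
      items_foldl_cond_insert_fresh pvTOKENS (fun t => PySem.Str.rfind header t ≥ 0)
        (fun t => PySem.Str.rfind header t) PySem.Dict.empty hnd
        (fun t _ => PySem.Dict.contains_empty t)]
    rw [show (PySem.Dict.empty (κ := String) (ν := Int)).items = [] from rfl, List.nil_append]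
    rw [show (fun (x : String × Int) => x.2) = (Prod.snd : String × Int → Int) from rfl]
    exact map_snd_filterMap_if pvTOKENS (fun t => PySem.Str.rfind header t ≥ 0) (fun t => PySem.Str.rfind header t)
  rw [hfvals]
  have hstep : (fun (head : PySem.Dict String (Option (Int × Int))) (token : String) =>
      if (pvTOKENS.foldl (fun d token =>
          if PySem.Str.rfind header token ≥ 0 then d.insert token (PySem.Str.rfind header token) else d)
          PySem.Dict.empty).contains token then
        head.insert token (some ((pvTOKENS.foldl (fun d token =>
            if PySem.Str.rfind header token ≥ 0 then d.insert token (PySem.Str.rfind header token) else d)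
            PySem.Dict.empty).getD token 0 + PySem.Str.len token,
          ((PySem.List.sorted (pvP' header) (fun x => x) false).find?
            (fun c => decide (c > (pvTOKENS.foldl (fun d token =>
              if PySem.Str.rfind header token ≥ 0 then d.insert token (PySem.Str.rfind header token) else d)
              PySem.Dict.empty).getD token 0))).getD (PySem.Str.len header)))
      else head.insert token none)
      = (fun (head : PySem.Dict String (Option (Int × Int))) (token : String) =>
          head.insert token (if token ∈ pvTOKENS ∧ PySem.Str.rfind header token ≥ 0 then
            some (PySem.Str.rfind header token + PySem.Str.len token,
              ((PySem.List.sorted (pvP' header) (fun x => x) false).find?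
                (fun c => decide (c > PySem.Str.rfind header token))).getD (PySem.Str.len header))
            else none)) := by
    funext head token
    rw [PySem.Dict.contains_eq_isSome_get?, hfget token]
    by_cases hc : token ∈ pvTOKENS ∧ PySem.Str.rfind header token ≥ 0
    · rw [if_pos hc]
      simp only [Option.isSome_some, if_true]
      rw [PySem.Dict.getD_eq_get?_getD, hfget token, if_pos hc, if_pos hc]
      rfl
    · rw [if_neg hc, if_neg hc]
      simp [PySem.Dict.get?_empty]
  rw [hstep]
  have hit := PySem.Dict.items_foldl_insert_fresh pvTOKENS (fun t => t)
      (fun token => if token ∈ pvTOKENS ∧ PySem.Str.rfind header token ≥ 0 then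
            some (PySem.Str.rfind header token + PySem.Str.len token,
              ((PySem.List.sorted (pvP' header) (fun x => x) false).find?
                (fun c => decide (c > PySem.Str.rfind header token))).getD (PySem.Str.len header))
            else none)
      PySem.Dict.empty
      (fun a _ => PySem.Dict.contains_empty a)
      (by rw [List.map_id']; exact hnd)
  dsimp only at hit
  rw [hit]
  rw [show (PySem.Dict.empty (κ := String) (ν := Option (Int × Int))).items = [] from rfl, List.nil_append]
  apply List.map_congr_left
  intro t ht
  by_cases h0 : PySem.Str.rfind header t ≥ 0
  · rw [show pvGB header t = some (pvR header t + PySem.Str.len t,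
      ((PySem.List.sorted (pvP' header) (fun x => x) false).find?
        (fun c => decide (c > pvR header t))).getD (PySem.Str.len header)) from if_pos h0]
    rw [if_pos ⟨ht, h0⟩]
    rfl
  · rw [show pvGB header t = none from if_neg h0]
    rw [if_neg (fun hc => h0 hc.2)]

-- in a ≤-sorted list, the first element > v is ≤ every element > v
theorem find_first_gt_min (S : List Int) (v c : Int) (hp : S.Pairwise (· ≤ ·))
    (hf : S.find? (fun c => decide (v < c)) = some c) :
    ∀ m ∈ S, v < m → c ≤ m := by
  induction S with
  | nil => simp at hf
  | cons a tl ih =>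
    rw [List.find?_cons] at hf
    rcases List.pairwise_cons.mp hp with ⟨ha, htl⟩
    by_cases hva : v < a
    · simp [hva] at hf
      subst hf
      intro m hm _
      rcases List.mem_cons.mp hm with h | h
      · exact le_of_eq h.symm
      · exact ha m h
    · simp [hva] at hf
      intro m hm hvm
      rcases List.mem_cons.mp hm with h | h
      · exact absurd (h ▸ hvm) hva
      · exact ih htl hf m h hvm

-- A's guarded min-of-filter equals B's first-greater scan of the sorted list
theorem stop_eq (P : List Int) (n v : Int) :
    (if P.filter (fun x => decide (x > v)) ≠ [] then
        (PySem.List.min? (P.filter (fun x => decide (x > v))) (fun x => x)).getD 0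
      else n)
      = ((PySem.List.sorted P (fun x => x) false).find? (fun c => decide (c > v))).getD n := by
  have hperm := PySem.List.sorted_perm P (fun x => x) false
  have hpair := PySem.List.sorted_pairwise P (fun x => x)
  cases hf : (PySem.List.sorted P (fun x => x) false).find? (fun c => decide (c > v)) with
  | none =>
    have hnone := List.find?_eq_none.mp hf
    have hfil : P.filter (fun x => decide (x > v)) = [] := by
      rw [List.filter_eq_nil_iff]
      intro x hx
      have : x ∈ PySem.List.sorted P (fun x => x) false := (hperm.mem_iff).mpr hx
      simpa using hnone x this
    simp [hfil]
  | some c =>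
    have hvc : v < c := by simpa using List.find?_some hf
    have hcS : c ∈ PySem.List.sorted P (fun x => x) false := List.mem_of_find?_eq_some hf
    have hcP : c ∈ P := (hperm.mem_iff).mp hcS
    have hcf : c ∈ P.filter (fun x => decide (x > v)) := by
      rw [List.mem_filter]; exact ⟨hcP, by simpa using hvc⟩
    have hne : P.filter (fun x => decide (x > v)) ≠ [] := List.ne_nil_of_mem hcf
    cases hm : PySem.List.min? (P.filter (fun x => decide (x > v))) (fun x => x) with
    | none => exact absurd ((PySem.List.min?_eq_none_iff _ _).mp hm) hne
    | some m =>
      have hmf := PySem.List.min?_mem hm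
      have hmP : m ∈ P := (List.mem_filter.mp hmf).1
      have hvm : v < m := by have := (List.mem_filter.mp hmf).2; simpa using this
      have h1 : m ≤ c := PySem.List.min?_isMin hm c hcf
      have h2 : c ≤ m := by
        have hfind : (PySem.List.sorted P (fun x => x) false).find? (fun c => decide (v < c)) = some c := by
          convert hf using 2
        exact find_first_gt_min _ v c hpair hfind m ((hperm.mem_iff).mpr hmP) hvm
      simp [hne, le_antisymm h1 h2]

theorem pvP'_eq (header : String) : pvP' header = pvP header := by
  unfold pvP' pvP
  apply List.filterMap_congr
  intro t _
  by_cases h : PySem.Str.rfind header t ≥ 0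
  · rw [if_pos h, if_pos (show pvR header t > -1 by unfold pvR; omega)]
    rfl
  · rw [if_neg h, if_neg (show ¬ pvR header t > -1 by unfold pvR; omega)]

theorem main_eq (header : String) :
    get_radolan_header_token_pos header = get_radolan_header_token_pos_alt header := by
  rw [A_norm, B_norm]
  apply List.map_congr_left
  intro t _
  by_cases h0 : PySem.Str.rfind header t ≥ 0
  · rw [show pvGB header t = some (pvR header t + PySem.Str.len t,
      ((PySem.List.sorted (pvP' header) (fun x => x) false).find?
        (fun c => decide (c > pvR header t))).getD (PySem.Str.len header)) from if_pos h0]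
    rw [show pvFA header t = some (pvR header t + PySem.Str.len t, pvStopA header (pvR header t)) from
      if_pos (show pvR header t > -1 by unfold pvR; omega)]
    rw [pvP'_eq]
    rw [show pvStopA header (pvR header t)
      = ((PySem.List.sorted (pvP header) (fun x => x) false).find?
          (fun c => decide (c > pvR header t))).getD (PySem.Str.len header) from
      stop_eq (pvP header) (PySem.Str.len header) (pvR header t)]
  · rw [show pvGB header t = none from if_neg h0,
      show pvFA header t = none from if_neg (show ¬ pvR header t > -1 by unfold pvR; omega)]

-- ===== VERDICT (by name: the statement is the Claim_ definition above) =====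
theorem get_radolan_header_token_pos_spec : Claim_equal_get_radolan_header_token_pos := by
  intro header _
  exact main_eq header
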